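-- pv_equiv track=rewrite | github.com/sngamos/FCS | Lab6/present.py | pLayer_inv
-- ===== SOURCE A (Python) =====
-- pmt = [0, 16, 32, 48, 1, 17, 33, 49, 2, 18, 34, 50, 3, 19, 35, 51,
--        4, 20, 36, 52, 5, 21, 37, 53, 6, 22, 38, 54, 7, 23, 39, 55,
--        8, 24, 40, 56, 9, 25, 41, 57, 10, 26, 42, 58, 11, 27, 43, 59,
--        12, 28, 44, 60, 13, 29, 45, 61, 14, 30, 46, 62, 15, 31, 47, 63]
--
-- def pLayer_inv(state):
--     if (type(state) == str):
--         binary_input = bin(int(state, 16))[2:].zfill(64)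
--     else:
--         binary_input = bin(state)[2:].zfill(64)
--     unshuffled_list = ['0' for i in range(64)]
--     for i in range(64):
--         unshuffled_list[pmt.index(i)] = binary_input[i]
--     unshuffled_bin_str = ''.join(unshuffled_list)
--     unshuffled_hex = hex(int(unshuffled_bin_str, 2))[2:].upper().zfill(16)
--     return unshuffled_hex
-- ===== SOURCE B (Python) =====
-- def pLayer_inv(state):
--     if type(state) == str:
--         bits = bin(int(state, 16))[2:].zfill(64)
--     else:
--         bits = bin(state)[2:].zfill(64)
--     block = bits[:64]
--     unshuffled = ''.join(block[q::16] for q in range(16))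
--     return hex(int(unshuffled, 2))[2:].upper().zfill(16)
-- ===== Notes on version B (the rewrite author's own statement) =====
-- stated objective: simpler
-- what changed: drops the permutation table and the scatter loop with its 64 linear pmt.index searches entirely: the unshuffled string is read off as the transpose of the 4x16 bit matrix, concatenating the 16 strided slices block[q::16]
import Mathlib
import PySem

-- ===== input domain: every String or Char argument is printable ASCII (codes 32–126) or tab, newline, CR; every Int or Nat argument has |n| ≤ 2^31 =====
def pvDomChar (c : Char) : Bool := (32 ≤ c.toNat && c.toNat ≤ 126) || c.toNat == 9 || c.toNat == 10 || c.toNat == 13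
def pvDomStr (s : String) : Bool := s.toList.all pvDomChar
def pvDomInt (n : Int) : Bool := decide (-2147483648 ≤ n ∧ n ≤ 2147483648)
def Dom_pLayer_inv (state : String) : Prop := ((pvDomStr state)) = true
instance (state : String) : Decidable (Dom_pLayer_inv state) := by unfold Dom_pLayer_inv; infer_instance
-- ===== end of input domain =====

-- B drops the permutation table and the scatter loop with its pmt.index searches: it reads the
-- unshuffled string as the transpose of the 4x16 bit matrix, concatenating 16 strided slices; same value.

def pvPmt : List Int := [0, 16, 32, 48, 1, 17, 33, 49, 2, 18, 34, 50, 3, 19, 35, 51,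
  4, 20, 36, 52, 5, 21, 37, 53, 6, 22, 38, 54, 7, 23, 39, 55,
  8, 24, 40, 56, 9, 25, 41, 57, 10, 26, 42, 58, 11, 27, 43, 59,
  12, 28, 44, 60, 13, 29, 45, 61, 14, 30, 46, 62, 15, 31, 47, 63]

-- hand-written port of hex(n)[2:] (lowercase hex digits), exact for n >= 0 (n < 0 unreachable under Pre_)
def pvHexDigitChar (d : Nat) : Char := if d < 10 then Char.ofNat (48 + d) else Char.ofNat (87 + d)

def pvToHexAux (n : Nat) (acc : List Char) : List Char :=
  if n = 0 then acc else pvToHexAux (n / 16) (pvHexDigitChar (n % 16) :: acc)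

def pvToHexChars (n : Int) : List Char :=
  if n ≤ 0 then ['0'] else pvToHexAux n.toNat []

-- shared preprocessing: bin(v)[2:].zfill(64)  (both Pythons have this line verbatim)
def pvBinaryInput (v : Int) : List Char :=
  PySem.Chars.zfill (PySem.List.slice (PySem.Int.toBinChars0b v) (some 2) none) 64

-- shared postprocessing: hex(int(bits, 2))[2:].upper().zfill(16)  (both Pythons have this line verbatim)
def pvPost (bits : List Char) : String :=
  String.ofList (PySem.Chars.zfill (PySem.Chars.upper (pvToHexChars ((PySem.Int.ofCharsBase? bits 2).getD 0))) 16)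

-- ===== PORT A =====
def pLayer_inv (state : String) : String :=
  match PySem.Int.ofStrBase? state 16 with
  | none => ""   -- int(state, 16) raises ValueError; outside Pre_
  | some v =>
    let binary_input := pvBinaryInput v
    let init : List Char := (PySem.List.pyRange 0 64 1).map (fun _ => '0')
    let unshuffled_list : List Char :=
      (PySem.List.pyRange 0 64 1).foldl
        (fun acc i =>
          PySem.List.pySetD acc (((PySem.List.index? pvPmt i).getD 0 : Nat) : Int)
            (PySem.List.pyGetD binary_input i '0')) init
    pvPost unshuffled_list

-- ===== PORT B =====
-- block[q::16] is a strided slice; step 16 ≠ 0, so slice? always returns some and '.getD []' is exact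
def pLayer_inv_alt (state : String) : String :=
  match PySem.Int.ofStrBase? state 16 with
  | none => ""
  | some v =>
    let bits := pvBinaryInput v
    let block := PySem.List.slice bits none (some 64)
    let unshuffled : List Char :=
      ((PySem.List.pyRange 0 16 1).map
        (fun q => (PySem.List.slice? block (some q) none 16).getD [])).flatten
    pvPost unshuffled

-- ===== PRECONDITION & SPEC =====
-- Pre_ excludes exactly the inputs where Python A raises ValueError: state that int(state, 16)
-- cannot parse, or that parses to a negative value (A then raises in int(unshuffled_bin_str, 2)).
def Pre_pLayer_inv (state : String) : Prop :=
  0 ≤ (PySem.Int.ofStrBase? state 16).getD (-1)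
instance (state : String) : Decidable (Pre_pLayer_inv state) := by unfold Pre_pLayer_inv; infer_instance
def pvWitness_pLayer_inv : String := "1234567890ABCDEF"

def Spec_pLayer_inv (state : String) (out : String) : Prop := out = pLayer_inv_alt state
instance (state : String) (out : String) : Decidable (Spec_pLayer_inv state out) := by unfold Spec_pLayer_inv; infer_instance

-- ===== CLAIM (what is proved, stated in full; the proofs are below) =====
def Claim_equal_pLayer_inv : Prop := ∀ (state : String), Dom_pLayer_inv state → Pre_pLayer_inv state → Spec_pLayer_inv state (pLayer_inv state)

-- ===== LEMMAS AND PROOFS =====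
-- mapping a function over the accumulator commutes with a scatter loop of pySetD writes
lemma pvScatterMap {A B : Type} (g : A → B) (idx : Int → Nat) (val : Int → A) :
    ∀ (l : List Int) (acc : List A),
      l.foldl (fun a i => PySem.List.pySetD a ((idx i : Nat) : Int) (g (val i))) (acc.map g)
      = (l.foldl (fun a i => PySem.List.pySetD a ((idx i : Nat) : Int) (val i)) acc).map g := by
  intro l
  induction l with
  | nil => intro acc; rfl
  | cons x t ih =>
    intro acc
    rw [List.foldl_cons, List.foldl_cons]
    have h : PySem.List.pySetD (acc.map g) ((idx x : Nat) : Int) (g (val x))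
        = (PySem.List.pySetD acc ((idx x : Nat) : Int) (val x)).map g := by
      rw [PySem.List.pySetD_natCast, PySem.List.pySetD_natCast, List.map_set]
    rw [h]
    exact ih _

-- a strided slice commutes with List.map: it selects positions, independent of the values
lemma pvSliceMap {A B : Type} (f : A → B) (l : List A) (a b : Option Int) (s : Int) :
    PySem.List.slice? (l.map f) a b s = (PySem.List.slice? l a b s).map (List.map f) := by
  unfold PySem.List.slice?
  rw [List.length_map]
  split_ifs with hs
  · rfl
  · rcases PySem.List.sliceIndices l.length a b s with ⟨st, e, stp⟩
    simp [List.map_filterMap, List.getElem?_map]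

-- column-concatenation of the strided slices of the index range is exactly the pmt table
set_option maxRecDepth 10000 in
lemma pvFlat : ((PySem.List.pyRange 0 16 1).map
    (fun q => (PySem.List.slice? (PySem.List.pyRange 0 64 1) (some q) none 16).getD [])).flatten = pvPmt := by
  decide

set_option maxRecDepth 10000 in
-- A's scatter loop over source bits and B's 16-column transpose of block = bits[:64] agree
lemma pvMiddle (bits : List Char) (h : 64 ≤ bits.length) :
    (PySem.List.pyRange 0 64 1).foldl
        (fun acc i =>
          PySem.List.pySetD acc (((PySem.List.index? pvPmt i).getD 0 : Nat) : Int)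
            (PySem.List.pyGetD bits i '0'))
        ((PySem.List.pyRange 0 64 1).map (fun _ => '0'))
    = ((PySem.List.pyRange 0 16 1).map
        (fun q => (PySem.List.slice? (PySem.List.slice bits none (some 64)) (some q) none 16).getD [])).flatten := by
  have hc : PySem.List.slice bits none (some 64) = bits.take 64 := by
    rw [PySem.List.slice_to bits (by norm_num : (0:Int) ≤ 64)]
    rfl
  have hclen : (bits.take 64).length = 64 := by
    simp [List.length_take]; omega
  -- A-side: scatter = pvPmt.map (read bits)
  have hinit0 : (PySem.List.pyRange 0 64 1).map (fun _ => '0') = List.replicate 64 '0' := by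
    decide
  have hconc : (PySem.List.pyRange 0 64 1).foldl
      (fun a i => PySem.List.pySetD a (((PySem.List.index? pvPmt i).getD 0 : Nat) : Int) (some i))
      (List.replicate 64 (none : Option Int)) = pvPmt.map some := by decide
  have hA : (PySem.List.pyRange 0 64 1).foldl
        (fun acc i =>
          PySem.List.pySetD acc (((PySem.List.index? pvPmt i).getD 0 : Nat) : Int)
            (PySem.List.pyGetD bits i '0'))
        ((PySem.List.pyRange 0 64 1).map (fun _ => '0'))
      = pvPmt.map (fun p => PySem.List.pyGetD bits p '0') := by
    have hscat := pvScatterMap (fun o => Option.elim o '0' (fun i => PySem.List.pyGetD bits i '0'))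
        (fun i => (PySem.List.index? pvPmt i).getD 0) (fun i => some i)
        (PySem.List.pyRange 0 64 1) (List.replicate 64 (none : Option Int))
    rw [hinit0]
    refine Eq.trans (Eq.trans ?_ (hscat.trans (congrArg _ hconc))) ?_
    · rfl
    · rw [List.map_map]
      rfl
  -- B-side: write take 64 bits as a map over the index range
  have hcmap : bits.take 64
      = (PySem.List.pyRange 0 64 1).map (fun i => (bits.take 64).getD i.toNat '0') := by
    apply List.ext_getElem
    · simp [PySem.List.length_pyRange_one, hclen]
    · intro i h1 h2
      rw [List.getElem_map, PySem.List.getElem_pyRange_one]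
      have hi : i < 64 := by
        have := h1; rw [hclen] at this; exact this
      rw [List.getD_eq_getElem _ _ (by simp [hclen]; omega)]
      simp
  have hgetd : ∀ (o : Option (List Int)) (f : Int → Char),
      (o.map (List.map f)).getD [] = (o.getD []).map f := by
    intro o f; cases o <;> rfl
  have hB : ((PySem.List.pyRange 0 16 1).map
        (fun q => (PySem.List.slice? (PySem.List.slice bits none (some 64)) (some q) none 16).getD [])).flatten
      = pvPmt.map (fun i => (bits.take 64).getD i.toNat '0') := by
    rw [hc]
    conv_lhs => rw [hcmap]
    calc ((PySem.List.pyRange 0 16 1).map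
            (fun q => (PySem.List.slice? ((PySem.List.pyRange 0 64 1).map (fun i => (bits.take 64).getD i.toNat '0')) (some q) none 16).getD [])).flatten
        = ((PySem.List.pyRange 0 16 1).map
            (fun q => ((PySem.List.slice? (PySem.List.pyRange 0 64 1) (some q) none 16).getD []).map (fun i => (bits.take 64).getD i.toNat '0'))).flatten := by
          simp only [pvSliceMap, hgetd]
      _ = (((PySem.List.pyRange 0 16 1).map
            (fun q => (PySem.List.slice? (PySem.List.pyRange 0 64 1) (some q) none 16).getD [])).flatten).map (fun i => (bits.take 64).getD i.toNat '0') := by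
          rw [List.map_flatten, List.map_map]; rfl
      _ = pvPmt.map (fun i => (bits.take 64).getD i.toNat '0') := by rw [pvFlat]
  have pvAll : ∀ p ∈ pvPmt, (0:Int) ≤ p ∧ p < 64 := by decide
  rw [hA, hB]
  apply List.map_congr_left
  intro p hp
  have hpb : (0:Int) ≤ p ∧ p < 64 := pvAll p hp
  have hlt : p < (bits.length : Int) := by omega
  rw [PySem.List.pyGetD_eq_getElem bits '0' hpb.1 (by exact_mod_cast hlt)]
  rw [List.getD_eq_getElem _ _ (by rw [hclen]; omega : p.toNat < (bits.take 64).length)]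
  simp

-- ===== VERDICT (by name: the statement is the Claim_ definition above) =====
theorem pLayer_inv_spec : Claim_equal_pLayer_inv := by
  intro state _ _
  unfold Spec_pLayer_inv pLayer_inv pLayer_inv_alt
  cases PySem.Int.ofStrBase? state 16 with
  | none => rfl
  | some v =>
    have hlen : 64 ≤ (pvBinaryInput v).length := by
      unfold pvBinaryInput
      rw [PySem.Chars.length_zfill]
      omega
    exact congrArg pvPost (pvMiddle (pvBinaryInput v) hlen)
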